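-- pv_equiv track=rewrite | github.com/mangeshraut712/SanskritNova | api/serverless.py | handle_tracks
-- ===== SOURCE A (Python) =====
-- LEARNING_TRACKS = [
--     {
--         "slug": "sanskrit-foundations",
--         "title": "Sanskrit Foundations",
--         "title_hi": "संस्कृत आधार",
--         "level": "Beginner",
--         "level_hi": "शुरुआती",
--         "duration": "2 weeks",
--         "duration_hi": "2 सप्ताह",
--         "focus": "Script basics, pronunciation, and essential vocabulary.",
--         "focus_hi": "लिपि मूल बातें, उच्चारण, और आवश्यक शब्दावली।",
--     },
--     {
--         "slug": "gita-guided-reading",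
--         "title": "Bhagavad Gita Guided Reading",
--         "title_hi": "भगवद् गीता निर्देशित पठन",
--         "level": "Intermediate",
--         "level_hi": "मध्यवर्ती",
--         "duration": "4 weeks",
--         "duration_hi": "4 सप्ताह",
--         "focus": "Verse-by-verse study with transliteration and explanation.",
--         "focus_hi": "लिप्यंतरण और व्याख्या के साथ श्लोक-दर-श्लोक अध्ययन।",
--     },
--     {
--         "slug": "grammar-lab",
--         "title": "Grammar Lab",
--         "title_hi": "व्याकरण प्रयोगशाला",
--         "level": "Advanced",
--         "level_hi": "उन्नत",
--         "duration": "Ongoing",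
--         "duration_hi": "निरंतर",
--         "focus": "Sandhi, compounds, morphology, and syntax analysis.",
--         "focus_hi": "संधि, समास, रूपविज्ञान और वाक्य विश्लेषण।",
--     },
-- ]
--
-- def handle_tracks(query_params):
--     lang = query_params.get("lang", ["en"])[0]
--
--     tracks_data = []
--     for track in LEARNING_TRACKS:
--         if lang == "hi":
--             track_data = {
--                 "slug": track["slug"],
--                 "title": track.get("title_hi", track["title"]),
--                 "level": track.get("level_hi", track["level"]),
--                 "duration": track.get("duration_hi", track["duration"]),
--                 "focus": track.get("focus_hi", track["focus"]),
--             }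
--         else:
--             track_data = {
--                 "slug": track["slug"],
--                 "title": track["title"],
--                 "level": track["level"],
--                 "duration": track["duration"],
--                 "focus": track["focus"],
--             }
--         tracks_data.append(track_data)
--
--     return tracks_data
-- ===== SOURCE B (Python) =====
-- LEARNING_TRACKS = [
--     {
--         "slug": "sanskrit-foundations",
--         "title": "Sanskrit Foundations",
--         "title_hi": "संस्कृत आधार",
--         "level": "Beginner",
--         "level_hi": "शुरुआती",
--         "duration": "2 weeks",
--         "duration_hi": "2 सप्ताह",
--         "focus": "Script basics, pronunciation, and essential vocabulary.",
--         "focus_hi": "लिपि मूल बातें, उच्चारण, और आवश्यक शब्दावली।",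
--     },
--     {
--         "slug": "gita-guided-reading",
--         "title": "Bhagavad Gita Guided Reading",
--         "title_hi": "भगवद् गीता निर्देशित पठन",
--         "level": "Intermediate",
--         "level_hi": "मध्यवर्ती",
--         "duration": "4 weeks",
--         "duration_hi": "4 सप्ताह",
--         "focus": "Verse-by-verse study with transliteration and explanation.",
--         "focus_hi": "लिप्यंतरण और व्याख्या के साथ श्लोक-दर-श्लोक अध्ययन।",
--     },
--     {
--         "slug": "grammar-lab",
--         "title": "Grammar Lab",
--         "title_hi": "व्याकरण प्रयोगशाला",
--         "level": "Advanced",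
--         "level_hi": "उन्नत",
--         "duration": "Ongoing",
--         "duration_hi": "निरंतर",
--         "focus": "Sandhi, compounds, morphology, and syntax analysis.",
--         "focus_hi": "संधि, समास, रूपविज्ञान और वाक्य विश्लेषण।",
--     },
-- ]
--
-- def _localize(suffix):
--     # one staged pass, run ONCE at import time, not per request
--     fields = ("slug", "title", "level", "duration", "focus")
--     return [{k: t.get(k + suffix, t[k]) for k in fields} for t in LEARNING_TRACKS]
--
-- # memoized localization table, built once at module load
-- _TABLE = {"hi": _localize("_hi"), "en": _localize("")}
--
-- def handle_tracks(query_params):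
--     lang = query_params.get("lang", ["en"])[0]
--     # per-call work is only a table lookup plus shallow copies of the cached dicts
--     return [dict(d) for d in _TABLE.get(lang, _TABLE["en"])]
-- ===== Notes on version B (the rewrite author's own statement) =====
-- stated objective: alternative
-- what changed: All localization is hoisted out of the handler into a table of both pre-localized track lists built once at module load; each call only looks up the table by language and shallow-copies the cached dicts, instead of re-running A's conditional per-track localization loop.
import Mathlib
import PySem

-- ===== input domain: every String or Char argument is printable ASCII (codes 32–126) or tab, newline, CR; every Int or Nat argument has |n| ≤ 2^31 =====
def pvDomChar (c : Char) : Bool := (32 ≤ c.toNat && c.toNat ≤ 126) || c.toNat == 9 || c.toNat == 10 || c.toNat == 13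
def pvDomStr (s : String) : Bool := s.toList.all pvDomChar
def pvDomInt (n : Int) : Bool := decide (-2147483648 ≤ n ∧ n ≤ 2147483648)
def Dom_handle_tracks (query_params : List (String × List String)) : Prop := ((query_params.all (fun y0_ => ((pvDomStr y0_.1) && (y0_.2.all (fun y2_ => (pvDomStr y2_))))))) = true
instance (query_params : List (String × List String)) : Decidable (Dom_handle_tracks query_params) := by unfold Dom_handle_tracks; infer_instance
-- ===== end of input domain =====

-- B precomputes both localized track lists once into a language-keyed table; the handler is then
-- only a table lookup plus shallow dict copies (A rebuilds the localization per call via a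
-- conditional loop). Return values agree; B returns copies of cached dicts, A fresh ones.

-- ===== PORT A =====
-- the module-level LEARNING_TRACKS constant (shared context of both programs)
def LEARNING_TRACKS : List (PySem.Dict String String) := [
  PySem.Dict.ofList [("slug", "sanskrit-foundations"), ("title", "Sanskrit Foundations"), ("title_hi", "संस्कृत आधार"), ("level", "Beginner"), ("level_hi", "शुरुआती"), ("duration", "2 weeks"), ("duration_hi", "2 सप्ताह"), ("focus", "Script basics, pronunciation, and essential vocabulary."), ("focus_hi", "लिपि मूल बातें, उच्चारण, और आवश्यक शब्दावली।")],
  PySem.Dict.ofList [("slug", "gita-guided-reading"), ("title", "Bhagavad Gita Guided Reading"), ("title_hi", "भगवद् गीता निर्देशित पठन"), ("level", "Intermediate"), ("level_hi", "मध्यवर्ती"), ("duration", "4 weeks"), ("duration_hi", "4 सप्ताह"), ("focus", "Verse-by-verse study with transliteration and explanation."), ("focus_hi", "लिप्यंतरण और व्याख्या के साथ श्लोक-दर-श्लोक अध्ययन।")],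
  PySem.Dict.ofList [("slug", "grammar-lab"), ("title", "Grammar Lab"), ("title_hi", "व्याकरण प्रयोगशाला"), ("level", "Advanced"), ("level_hi", "उन्नत"), ("duration", "Ongoing"), ("duration_hi", "निरंतर"), ("focus", "Sandhi, compounds, morphology, and syntax analysis."), ("focus_hi", "संधि, समास, रूपविज्ञान और वाक्य विश्लेषण।")]]

-- track["k"]: the key is always present in LEARNING_TRACKS, so this getD "" is exact there
def pvIdx (t : PySem.Dict String String) (k : String) : String := (PySem.Dict.get? t k).getD ""

def handle_tracks (query_params : List (String × List String)) : List (List (String × String)) :=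
  -- query_params.get("lang", ["en"])[0]; Python raises IndexError when the list is empty (excluded by Pre_)
  match PySem.List.pyGet? ((PySem.Dict.get? (PySem.Dict.mk query_params) "lang").getD ["en"]) 0 with
  | none => []
  | some lang =>
    LEARNING_TRACKS.foldl (fun tracks_data track =>
      tracks_data ++ [if lang == "hi" then
        [("slug", pvIdx track "slug"),
         ("title", PySem.Dict.getD track "title_hi" (pvIdx track "title")),
         ("level", PySem.Dict.getD track "level_hi" (pvIdx track "level")),
         ("duration", PySem.Dict.getD track "duration_hi" (pvIdx track "duration")),
         ("focus", PySem.Dict.getD track "focus_hi" (pvIdx track "focus"))]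
      else
        [("slug", pvIdx track "slug"),
         ("title", pvIdx track "title"),
         ("level", pvIdx track "level"),
         ("duration", pvIdx track "duration"),
         ("focus", pvIdx track "focus")]]) []

-- ===== PORT B =====
def pvFields : List String := ["slug", "title", "level", "duration", "focus"]

-- _localize(suffix): the staged pass Source B runs once at import time
def pvLocalize (suffix : String) : List (List (String × String)) :=
  LEARNING_TRACKS.map (fun t =>
    pvFields.map (fun k => (k, PySem.Dict.getD t (k ++ suffix) ((PySem.Dict.get? t k).getD ""))))

-- _TABLE: the module-load-time memoization table
def pvTable : PySem.Dict String (List (List (String × String))) :=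
  PySem.Dict.mk [("hi", pvLocalize "_hi"), ("en", pvLocalize "")]  -- literal dict with distinct keys

def handle_tracks_alt (query_params : List (String × List String)) : List (List (String × String)) :=
  match PySem.List.pyGet? ((PySem.Dict.get? (PySem.Dict.mk query_params) "lang").getD ["en"]) 0 with
  | none => []
  | some lang =>
    -- [dict(d) for d in _TABLE.get(lang, _TABLE["en"])]; dict(d) is a shallow copy = identity on the assoc list
    (PySem.Dict.getD pvTable lang ((PySem.Dict.get? pvTable "en").getD [])).map (fun d => d)

-- ===== PRECONDITION & SPEC =====
-- Pre_ excludes only a "lang" entry mapped to the empty list, on which A raises IndexError.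
def Pre_handle_tracks (query_params : List (String × List String)) : Prop :=
  PySem.Dict.get? (PySem.Dict.mk query_params) "lang" ≠ some []
instance (query_params : List (String × List String)) : Decidable (Pre_handle_tracks query_params) := by unfold Pre_handle_tracks; infer_instance
def pvWitness_handle_tracks : (List (String × List String)) := [("lang", ["hi"])]

def Spec_handle_tracks (query_params : List (String × List String)) (out : List (List (String × String))) : Prop := out = handle_tracks_alt query_params
instance (query_params : List (String × List String)) (out : List (List (String × String))) : Decidable (Spec_handle_tracks query_params out) := by unfold Spec_handle_tracks; infer_instance

-- ===== CLAIM (what is proved, stated in full; the proofs are below) =====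
def Claim_equal_handle_tracks : Prop := ∀ (query_params : List (String × List String)), Dom_handle_tracks query_params → Pre_handle_tracks query_params → Spec_handle_tracks query_params (handle_tracks query_params)

-- ===== LEMMAS AND PROOFS =====
set_option maxRecDepth 8192 in
theorem bodies_eq (lang : String) :
    (LEARNING_TRACKS.foldl (fun tracks_data track =>
      tracks_data ++ [if lang == "hi" then
        [("slug", pvIdx track "slug"),
         ("title", PySem.Dict.getD track "title_hi" (pvIdx track "title")),
         ("level", PySem.Dict.getD track "level_hi" (pvIdx track "level")),
         ("duration", PySem.Dict.getD track "duration_hi" (pvIdx track "duration")),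
         ("focus", PySem.Dict.getD track "focus_hi" (pvIdx track "focus"))]
      else
        [("slug", pvIdx track "slug"),
         ("title", pvIdx track "title"),
         ("level", pvIdx track "level"),
         ("duration", pvIdx track "duration"),
         ("focus", pvIdx track "focus")]]) []) =
    (PySem.Dict.getD pvTable lang ((PySem.Dict.get? pvTable "en").getD [])).map (fun d => d) := by
  by_cases hhi : lang = "hi"
  · subst hhi; decide
  · have hb : (lang == "hi") = false := by simp [hhi]
    by_cases hen : lang = "en"
    · subst hen; decide
    · have hget : PySem.Dict.get? pvTable lang = none := by
        simp [pvTable, PySem.Dict.get?]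
        exact ⟨Ne.symm hhi, Ne.symm hen⟩
      simp only [hb, PySem.Dict.getD, hget]
      decide

-- ===== VERDICT (by name: the statement is the Claim_ definition above) =====
theorem handle_tracks_spec : Claim_equal_handle_tracks := by
  intro qp _ _
  unfold Spec_handle_tracks handle_tracks handle_tracks_alt
  cases hm : PySem.List.pyGet? ((PySem.Dict.get? (PySem.Dict.mk qp) "lang").getD ["en"]) 0 with
  | none => rfl
  | some lang => exact bodies_eq lang
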